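-- pv_equiv track=rewrite | github.com/minhtrung1997/bioturing-first-test-lib | trung_bftl/problem_functions.py | find_spliced_motif
-- ===== SOURCE A (Python) =====
-- def find_spliced_motif(dna, motif):
--     """
--     Finds the locations of a motif in a DNA sequence after splicing out the introns.
--     Args:
--         dna (str): The input DNA sequence.
--         motif (str): The motif to search for.
--     Returns:
--         list: The starting positions of the motif in the DNA sequence after splicing out the introns.
--     """
--     start = 0
--     positions = []
--     for base in motif:
--         pos = dna.find(base, start)
--         if pos == -1:
--             return positions
--         positions.append(pos + 1)
--         start = pos + 1
--     return positions
-- ===== SOURCE B (Python) =====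
-- def find_spliced_motif(dna, motif):
--     """Greedy spliced-motif positions: single pass over dna with a motif pointer."""
--     positions = []
--     mi = 0
--     for i, base in enumerate(dna):
--         if mi == len(motif):
--             break
--         if base == motif[mi]:
--             positions.append(i + 1)
--             mi += 1
--     return positions
-- ===== Notes on version B (the rewrite author's own statement) =====
-- stated objective: alternative
-- what changed: B makes one enumerate pass over dna with a motif pointer, matching characters in place, instead of A's loop over motif characters that repeatedly calls dna.find with a moving start offset.
import Mathlib
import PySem

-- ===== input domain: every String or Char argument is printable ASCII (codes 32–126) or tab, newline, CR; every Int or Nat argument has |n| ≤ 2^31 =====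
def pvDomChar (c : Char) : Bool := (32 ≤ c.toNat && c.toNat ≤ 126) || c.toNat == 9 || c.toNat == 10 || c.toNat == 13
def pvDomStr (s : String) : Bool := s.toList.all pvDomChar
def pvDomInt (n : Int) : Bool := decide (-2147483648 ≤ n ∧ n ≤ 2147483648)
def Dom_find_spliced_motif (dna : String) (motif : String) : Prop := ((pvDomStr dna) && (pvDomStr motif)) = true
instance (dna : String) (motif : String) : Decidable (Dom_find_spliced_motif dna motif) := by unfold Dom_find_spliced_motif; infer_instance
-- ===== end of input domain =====

-- B replaces A's motif-driven loop of dna.find calls by a single character-by-character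
-- pass over dna with a motif pointer (objective: alternative decomposition, same cost).

-- ===== PORT A =====
-- A's loop over motif: pos = dna.find(base, start); stop on -1, else record pos+1 and move start.
def pvGoA (dna : List Char) : List Char → Int → List Int → List Int
  | [], _, positions => positions
  | b :: rest, start, positions =>
    let pos := PySem.Chars.findFrom dna [b] start none
    if pos = -1 then positions
    else pvGoA dna rest (pos + 1) (positions ++ [pos + 1])

def find_spliced_motif (dna : String) (motif : String) : List Int :=
  pvGoA dna.toList motif.toList 0 []

-- ===== PORT B =====
-- B's single enumerate pass over dna with a motif pointer (here: the remaining motif suffix).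
def pvGoB : List Char → List Char → Int → List Int
  | _, [], _ => []
  | [], _ :: _, _ => []
  | c :: d, m :: ms, i =>
    if c = m then (i + 1) :: pvGoB d ms (i + 1) else pvGoB d (m :: ms) (i + 1)

def find_spliced_motif_alt (dna : String) (motif : String) : List Int :=
  pvGoB dna.toList motif.toList 0

-- ===== PRECONDITION & SPEC =====
def Spec_find_spliced_motif (dna : String) (motif : String) (out : List Int) : Prop := out = find_spliced_motif_alt dna motif
instance (dna : String) (motif : String) (out : List Int) : Decidable (Spec_find_spliced_motif dna motif out) := by unfold Spec_find_spliced_motif; infer_instance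

-- ===== CLAIM (what is proved, stated in full; the proofs are below) =====
def Claim_equal_find_spliced_motif : Prop := ∀ (dna : String) (motif : String), Dom_find_spliced_motif dna motif → Spec_find_spliced_motif dna motif (find_spliced_motif dna motif)

-- ===== LEMMAS AND PROOFS =====

-- find.go started one position later: failure stays -1, success shifts by 1
lemma pv_go_succ (sub : List Char) : ∀ (t : List Char) (k : Nat),
    PySem.Chars.find.go sub t (k + 1) =
      if PySem.Chars.find.go sub t k = -1 then -1 else PySem.Chars.find.go sub t k + 1 := by
  intro t
  induction t with
  | nil =>
      intro k
      simp only [PySem.Chars.find.go]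
      split_ifs <;> push_cast <;> omega
  | cons c t ih =>
      intro k
      rw [PySem.Chars.find.go, PySem.Chars.find.go]
      by_cases hp : sub.isPrefixOf (c :: t) = true
      · simp only [hp, if_true]
        split_ifs <;> push_cast <;> omega
      · simp only [hp, if_false, Bool.false_eq_true]
        exact ih (k + 1)

-- one-step characterisation of find for a single-character needle
lemma pv_find_single_cons (c b : Char) (d : List Char) :
    PySem.Chars.find (c :: d) [b] =
      if c = b then 0
      else if PySem.Chars.find d [b] = -1 then -1 else PySem.Chars.find d [b] + 1 := by
  show PySem.Chars.find.go [b] (c :: d) 0 = _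
  rw [PySem.Chars.find.go]
  have hpre : [b].isPrefixOf (c :: d) = (b == c) := by simp [List.isPrefixOf]
  rw [hpre]
  have h1 : PySem.Chars.find.go [b] d (0 + 1) =
      if PySem.Chars.find.go [b] d 0 = -1 then -1 else PySem.Chars.find.go [b] d 0 + 1 :=
    pv_go_succ [b] d 0
  by_cases hc : c = b
  · simp [hc]
  · have : (b == c) = false := by simp [Ne.symm hc]
    simp only [this, Bool.false_eq_true, if_false, hc]
    simpa [PySem.Chars.find] using h1

lemma pv_find_single_nil (b : Char) : PySem.Chars.find [] [b] = -1 := by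
  simp [PySem.Chars.find, PySem.Chars.find.go]

-- main invariant: A's offset loop on the full dna equals B's scan of the suffix dna.drop k
lemma pv_main (dna : List Char) : ∀ (d ms : List Char) (k : Nat) (acc : List Int),
    dna.drop k = d → k ≤ dna.length →
    pvGoA dna ms (k : Int) acc = acc ++ pvGoB d ms (k : Int) := by
  intro d
  induction d with
  | nil =>
      intro ms k acc hd hk
      cases ms with
      | nil => simp [pvGoA, pvGoB]
      | cons b rest =>
          rw [pvGoA, pvGoB]
          have hf := PySem.Chars.findFrom_natCast dna [b] k hk
          rw [hd, pv_find_single_nil] at hf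
          simp [hf]
  | cons c d' ih =>
      intro ms k acc hd hk
      cases ms with
      | nil => simp [pvGoA, pvGoB]
      | cons b rest =>
          have hk1 : k + 1 ≤ dna.length := by
            by_contra h
            have : dna.drop k = [] := List.drop_eq_nil_of_le (by omega)
            rw [hd] at this; exact List.cons_ne_nil _ _ this
          have hd' : dna.drop (k + 1) = d' := by
            have : dna.drop (k + 1) = (dna.drop k).drop 1 := by
              rw [List.drop_drop]
            rw [this, hd]; rfl
          have hf := PySem.Chars.findFrom_natCast dna [b] k hk
          rw [hd, pv_find_single_cons] at hf
          by_cases hc : c = b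
          · -- match: A finds it exactly at k
            rw [if_pos hc] at hf
            simp only [if_neg (by norm_num : ¬ (0:Int) = -1), add_zero] at hf
            rw [pvGoA, pvGoB, if_pos hc]
            simp only [hf]
            have hkne : ¬ ((k:Int) = -1) := by omega
            rw [if_neg hkne]
            have := ih rest (k + 1) (acc ++ [(k:Int) + 1]) hd' hk1
            push_cast at this ⊢
            rw [this, List.append_assoc]
            rfl
          · -- no match at position k: A's findFrom from k equals findFrom from k+1
            rw [if_neg hc] at hf
            have hf' := PySem.Chars.findFrom_natCast dna [b] (k + 1) hk1
            rw [hd'] at hf'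
            have heq : PySem.Chars.findFrom dna [b] (k : Int) none
                = PySem.Chars.findFrom dna [b] ((k + 1 : Nat) : Int) none := by
              rw [hf, hf']
              have hge := PySem.Chars.neg_one_le_find d' [b]
              by_cases hfind : PySem.Chars.find d' [b] = -1
              · simp [hfind]
              · rw [if_neg hfind, if_neg (by omega), if_neg (by omega)]
                push_cast; ring
            have := ih (b :: rest) (k + 1) acc hd' hk1
            rw [pvGoB, if_neg hc]
            rw [pvGoA] at this ⊢
            simp only [heq]
            push_cast at this ⊢
            rw [this]

-- ===== VERDICT (by name: the statement is the Claim_ definition above) =====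
theorem find_spliced_motif_spec : Claim_equal_find_spliced_motif := by
  intro dna motif _
  unfold Spec_find_spliced_motif find_spliced_motif find_spliced_motif_alt
  have h := pv_main dna.toList dna.toList motif.toList 0 [] (by simp) (by simp)
  simpa using h
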